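-- pv_equiv track=rewrite | github.com/ThomasCZhang/CMU-02604-Bioinformatics-Spring2023 | Week11 (Burrows Wheeler)/BWTDecode.py | BWTDecode
-- ===== SOURCE A (Python) =====
-- def BWTDecode(word: str) -> str:
--     """
--     Decodes a Burrows-Wheeler encoded word.
--     Input:
--         word: The Burrows-Wheeler encoded word.
--     """
--     ranks = GetRanks(word)
--     idx_dict = GetCharPositions(word)
--     decoded = "$"
--     next_idx = 0
--     for _ in range(len(word)-1):
--         next_char = word[next_idx]
--         decoded = "".join([next_char, decoded])
--         next_idx = ranks[next_char] + idx_dict[next_char][next_idx]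
--
--     return decoded
--
-- def GetCharPositions(word: str) -> dict[str, dict[int, int]]:
--     """
--     gets the indicies that each unique character in a word appears at.
--     Input:
--         word: The word being analyzed
--     """
--     char_idx_dict = {}
--     for i, letter in enumerate(word):
--         if letter in char_idx_dict:
--             order = len(char_idx_dict[letter])
--             char_idx_dict[letter][i] = order
--         else:
--             char_idx_dict[letter] = {i: 0}
--     return char_idx_dict
--
-- def GetRanks(word: str) -> dict[str, int]:
--     """
--     Determines the rank of each character in word. The rank of a character is the number of times characters that are
--     "smaller" than that character appear in the word. A "smaller" character, is a character that occurs earlier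
--     when ordered lexicographically.
--     Input:
--         word: the word being analyzed.
--     Output:
--         The rank of each unique character in word stored in a dictionary.
--     """
--     letter_counts = CountLetters(word)
--     sorted_chars = sorted(letter_counts.keys())
--     rank = {}
--     total = 0
--     for char in sorted_chars:
--         rank[char] = total
--         total += letter_counts[char]
--     return rank
--
-- def CountLetters(word: str) -> dict[str, int]:
--     """
--     Counts the number of times a character occurs in word.
--     Input:
--         word: the word being analyzed.
--     Output:
--         A dictionary were the key is the character being analyzed, and the value is the number of times that letter
--         occurs in word.
--     """
--     count_dict = {}
--     for character in word:
--         if character in count_dict: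
--             count_dict[character] += 1
--         else:
--             count_dict[character] = 1
--     return count_dict
-- ===== SOURCE B (Python) =====
-- def BWTDecode(word: str) -> str:
--     """
--     Decodes a Burrows-Wheeler encoded word via a directly counted LF-mapping
--     array (no rank/position dictionaries), then one forward walk + reverse.
--     """
--     n = len(word)
--     lf = [sum(1 for j in range(n)
--               if word[j] < word[i] or (word[j] == word[i] and j < i))
--           for i in range(n)]
--     chars = []
--     idx = 0
--     for _ in range(n - 1):
--         chars.append(word[idx])
--         idx = lf[idx]
--     return "".join(reversed(chars)) + "$"
-- ===== Notes on version B (the rewrite author's own statement) =====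
-- stated objective: simpler
-- what changed: Replaces A's three dictionary-building helpers (letter counts, cumulative ranks over the sorted alphabet, per-character occurrence-index maps) by one directly counted LF-mapping array lf[i] = #{j : (word[j],j) < (word[i],i)}, then the same backward walk done forward with a final reverse.
import Mathlib
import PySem

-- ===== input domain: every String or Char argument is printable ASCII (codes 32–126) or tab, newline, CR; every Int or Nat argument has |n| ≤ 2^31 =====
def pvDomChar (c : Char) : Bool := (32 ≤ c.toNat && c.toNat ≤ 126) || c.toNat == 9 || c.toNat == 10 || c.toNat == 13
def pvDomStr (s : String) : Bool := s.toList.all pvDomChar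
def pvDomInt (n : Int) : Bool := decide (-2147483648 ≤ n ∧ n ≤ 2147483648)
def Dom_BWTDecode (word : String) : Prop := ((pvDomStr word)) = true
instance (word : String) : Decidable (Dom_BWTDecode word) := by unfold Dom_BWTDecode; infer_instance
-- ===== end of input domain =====

-- B replaces A's three rank/position dictionaries by one directly counted LF-mapping array
-- (objective: simpler; same LF walk, different computation of the map; no speed claim).

-- ===== PORT A =====
-- CountLetters(word)
def CountLettersA (cs : List Char) : PySem.Dict Char Int :=
  cs.foldl
    (fun d c => if d.contains c then d.insert c (d.getD c 0 + 1) else d.insert c 1)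
    PySem.Dict.empty

-- GetRanks(word); letter_counts[char] is always a present key, so getD 0 is exact there
def GetRanksA (cs : List Char) : PySem.Dict Char Int :=
  let letterCounts := CountLettersA cs
  let sortedChars := PySem.List.sorted letterCounts.keys (fun c => c)
  (sortedChars.foldl
    (fun (p : PySem.Dict Char Int × Int) c => (p.1.insert c p.2, p.2 + letterCounts.getD c 0))
    (PySem.Dict.empty, 0)).1

-- GetCharPositions(word); mutating the inner dict in place = re-inserting it (same lookups)
def GetCharPositionsA (cs : List Char) : PySem.Dict Char (PySem.Dict Int Int) :=
  (PySem.List.enumerate cs).foldl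
    (fun d p =>
      if d.contains p.2 then
        let inner := d.getD p.2 PySem.Dict.empty
        d.insert p.2 (inner.insert p.1 (inner.size : Int))
      else
        d.insert p.2 (PySem.Dict.empty.insert p.1 0))
    PySem.Dict.empty

-- on every reachable state 0 ≤ next_idx < len(word), so word[next_idx] and the two dict
-- lookups never raise in Python; the total lookups (pyGetD / getD) are exact there
def BWTDecode (word : String) : String :=
  let cs := word.toList
  let ranks := GetRanksA cs
  let idxDict := GetCharPositionsA cs
  let r := (List.range (cs.length - 1)).foldl
    (fun (st : List Char × Int) _ =>
      let nextChar := PySem.List.pyGetD cs st.2 ' '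
      (nextChar :: st.1,
        ranks.getD nextChar 0 + (idxDict.getD nextChar PySem.Dict.empty).getD st.2 0))
    (['$'], 0)
  String.ofList r.1

-- ===== PORT B =====
-- lf[i] = number of j with (word[j], j) < (word[i], i), counted directly (sum of a 0/1 generator)
def BWTDecode_alt (word : String) : String :=
  let cs := word.toList
  let n := cs.length
  let lf : List Int := (List.range n).map (fun i =>
    (List.range n).foldl
      (fun acc j =>
        if cs.getD j ' ' < cs.getD i ' ' ∨ (cs.getD j ' ' = cs.getD i ' ' ∧ j < i)
        then acc + 1 else acc) 0)
  let r := (List.range (n - 1)).foldl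
    (fun (st : List Char × Int) _ =>
      (st.1 ++ [PySem.List.pyGetD cs st.2 ' '], PySem.List.pyGetD lf st.2 0))
    ([], 0)
  String.ofList (r.1.reverse ++ ['$'])


-- ===== PRECONDITION & SPEC =====
def Spec_BWTDecode (word : String) (out : String) : Prop := out = BWTDecode_alt word
instance (word : String) (out : String) : Decidable (Spec_BWTDecode word out) := by
  unfold Spec_BWTDecode; infer_instance

-- ===== CLAIM (what is proved, stated in full; the proofs are below) =====
def Claim_equal_BWTDecode : Prop := ∀ (word : String), Dom_BWTDecode word → Spec_BWTDecode word (BWTDecode word)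

-- ===== LEMMAS AND PROOFS =====

theorem countA_eq (cs : List Char) (d : PySem.Dict Char Int) :
    cs.foldl
      (fun d c => if d.contains c then d.insert c (d.getD c 0 + 1) else d.insert c 1) d
    = cs.foldl (fun d c => d.insert c (d.getD c 0 + 1)) d := by
  induction cs generalizing d with
  | nil => rfl
  | cons c cs ih =>
    simp only [List.foldl_cons]
    by_cases h : d.contains c = true
    · rw [if_pos h, ih]
    · rw [if_neg h, PySem.Dict.getD_of_not_contains d 0 (by simpa using h), ih]
      norm_num

theorem getD_CountLettersA (cs : List Char) (c : Char) :
    (CountLettersA cs).getD c 0 = (cs.count c : Int) := by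
  unfold CountLettersA
  rw [countA_eq, PySem.Dict.getD_foldl_insert_add_one, PySem.Dict.getD_empty]
  ring

theorem keys_CountLettersA (cs : List Char) :
    (CountLettersA cs).keys = PySem.Set.ofList cs := by
  unfold CountLettersA
  rw [countA_eq, PySem.Dict.keys_foldl_insert, PySem.Dict.keys_empty,
    PySem.Set.update_nil_left]

theorem rankFold_snd (cnt : Char → Int) (ys : List Char) (d : PySem.Dict Char Int) (t : Int) :
    (ys.foldl (fun p c => (p.1.insert c p.2, p.2 + cnt c)) (d, t)).2
      = t + (ys.map cnt).sum := by
  induction ys generalizing d t with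
  | nil => simp
  | cons y ys ih => simp [List.foldl_cons, ih]; ring

theorem rankFold_getD_not_mem (cnt : Char → Int) (ys : List Char)
    (d : PySem.Dict Char Int) (t : Int) (c : Char) (hc : c ∉ ys) :
    ((ys.foldl (fun p c => (p.1.insert c p.2, p.2 + cnt c)) (d, t)).1).getD c 0
      = d.getD c 0 := by
  induction ys generalizing d t with
  | nil => rfl
  | cons y ys ih =>
    simp only [List.foldl_cons]
    rw [ih _ _ (by simp at hc; exact hc.2)]
    exact PySem.Dict.getD_insert_of_ne _ _ _ (by simp at hc; exact hc.1)

theorem rankFold_getD_split (cnt : Char → Int) (ys₁ ys₂ : List Char)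
    (d : PySem.Dict Char Int) (t : Int) (c : Char) (hc : c ∉ ys₂) :
    (((ys₁ ++ c :: ys₂).foldl (fun p c => (p.1.insert c p.2, p.2 + cnt c)) (d, t)).1).getD c 0
      = t + (ys₁.map cnt).sum := by
  rw [List.foldl_append]
  set st := ys₁.foldl (fun p c => (p.1.insert c p.2, p.2 + cnt c)) (d, t) with hst
  rw [List.foldl_cons]
  rw [rankFold_getD_not_mem cnt ys₂ _ _ c hc]
  rw [PySem.Dict.getD_insert_self]
  have := rankFold_snd cnt ys₁ d t
  rw [← hst] at this
  rw [this]
theorem getD_GetRanksA (cs : List Char) (c : Char) (hc : c ∈ cs) :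
    (GetRanksA cs).getD c 0 = (cs.countP (fun d => decide (d < c)) : Int) := by
  unfold GetRanksA
  simp only [keys_CountLettersA]
  set sc := PySem.List.sorted (PySem.Set.ofList cs) (fun c => c) with hsc
  have hnd : sc.Nodup := ((PySem.List.sorted_perm _ _ _).nodup_iff).2 (PySem.Set.nodup_ofList cs)
  have hpw : sc.Pairwise (fun a b => a < b) := by
    have h1 := PySem.List.sorted_pairwise (PySem.Set.ofList cs) (fun c => c)
    rw [← hsc] at h1
    exact (h1.and hnd).imp (fun h => lt_of_le_of_ne h.1 h.2)
  have hmem : c ∈ sc := by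
    rw [hsc, PySem.List.mem_sorted, PySem.Set.mem_ofList]; exact hc
  obtain ⟨ys₁, ys₂, hsplit⟩ := List.append_of_mem hmem
  rw [hsplit] at hpw
  have hlt₁ : ∀ x ∈ ys₁, x < c := by
    intro x hx
    exact (List.pairwise_append.1 hpw).2.2 x hx c (List.mem_cons_self)
  have hlt₂ : ∀ y ∈ ys₂, c < y := by
    intro y hy
    exact (List.pairwise_cons.1 (List.pairwise_append.1 hpw).2.1).1 y hy
  have hc₂ : c ∉ ys₂ := fun h => lt_irrefl c (hlt₂ c h)
  rw [hsplit, rankFold_getD_split _ _ _ _ _ _ hc₂, zero_add]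
  have hmapc : ys₁.map (fun x => (CountLettersA cs).getD x 0)
      = ys₁.map (fun x => ((cs.count x : Nat) : Int)) :=
    List.map_congr_left (fun x _ => getD_CountLettersA cs x)
  rw [hmapc]
  have hfilt : sc.filter (fun d => decide (d < c)) = ys₁ := by
    rw [hsplit, List.filter_append, List.filter_cons]
    rw [List.filter_eq_self.2 (fun x hx => by simpa using hlt₁ x hx)]
    simp only [decide_eq_true_eq, lt_irrefl]
    rw [List.filter_eq_nil_iff.2 (fun y hy => by simpa using not_lt_of_gt (hlt₂ y hy))]
    simp
  have hperm : sc.Perm cs.dedup := by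
    refine (PySem.List.sorted_perm _ _ _).trans ?_
    exact (List.perm_ext_iff_of_nodup (PySem.Set.nodup_ofList cs) cs.nodup_dedup).2
      (fun a => by rw [PySem.Set.mem_ofList, List.mem_dedup])
  have hperm₁ : ys₁.Perm (cs.dedup.filter (fun d => decide (d < c))) := by
    rw [← hfilt]; exact hperm.filter _
  have hsum : (ys₁.map (fun x => ((cs.count x : Nat) : Int))).sum
      = ((cs.dedup.filter (fun d => decide (d < c))).map (fun x => ((cs.count x : Nat) : Int))).sum :=
    (hperm₁.map _).sum_eq
  rw [hsum]
  have := List.sum_map_count_dedup_filter_eq_countP (fun d => decide (d < c)) cs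
  calc ((cs.dedup.filter (fun d => decide (d < c))).map (fun x => ((cs.count x : Nat) : Int))).sum
      = (((cs.dedup.filter (fun d => decide (d < c))).map (fun x => cs.count x)).sum : Int) := by
        rw [Nat.cast_list_sum, List.map_map]; rfl
    _ = _ := by rw [this]
theorem posA_inv (cs : List Char) : ∀ c : Char,
    ((GetCharPositionsA cs).getD c PySem.Dict.empty).size = cs.count c
    ∧ (∀ j : Nat, j < cs.length → cs.getD j ' ' = c →
        ((GetCharPositionsA cs).getD c PySem.Dict.empty).getD (j : Int) 0
          = ((cs.take j).count c : Int))
    ∧ (GetCharPositionsA cs).contains c = decide (c ∈ cs)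
    ∧ (∀ j : Nat, cs.length ≤ j →
        ((GetCharPositionsA cs).getD c PySem.Dict.empty).contains (j : Int) = false) := by
  induction cs using List.reverseRecOn with
  | nil =>
    intro c
    refine ⟨?_, ?_, ?_, ?_⟩ <;>
      simp [GetCharPositionsA, PySem.List.enumerate_nil, PySem.Dict.getD_empty,
        PySem.Dict.size_empty, PySem.Dict.contains_empty]
  | append_singleton cs' x ih =>
    have hunf : GetCharPositionsA (cs' ++ [x]) =
        (if (GetCharPositionsA cs').contains x then
          (GetCharPositionsA cs').insert x
            (((GetCharPositionsA cs').getD x PySem.Dict.empty).insert ((cs'.length : Nat) : Int)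
              ((((GetCharPositionsA cs').getD x PySem.Dict.empty).size : Nat) : Int))
        else
          (GetCharPositionsA cs').insert x (PySem.Dict.empty.insert ((cs'.length : Nat) : Int) 0)) := by
      show (PySem.List.enumerate (cs' ++ [x])).foldl _ _ = _
      rw [PySem.List.enumerate_append, List.foldl_append, PySem.List.enumerate_cons,
        PySem.List.enumerate_nil]
      simp only [List.foldl_cons, List.foldl_nil, zero_add]
      rfl
    intro c
    obtain ⟨iha, ihb, ihc, ihd⟩ := ih c
    obtain ⟨ixa, ixb, ixc, ixd⟩ := ih x
    by_cases hx : x ∈ cs'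
    · -- letter already seen: the inner dict gains key len(cs')
      rw [hunf, if_pos (by rw [ixc]; simpa using hx)]
      by_cases hcx : c = x
      · subst hcx
        refine ⟨?_, ?_, ?_, ?_⟩
        · rw [PySem.Dict.getD_insert_self, PySem.Dict.size_insert,
            if_neg (by rw [ixd cs'.length le_rfl]; simp), iha]
          simp [List.count_append]
        · intro j hj hgj
          rw [PySem.Dict.getD_insert_self]
          rcases Nat.lt_succ_iff_lt_or_eq.1 (by simpa using hj) with hjl | hje
          · rw [PySem.Dict.getD_insert_of_ne _ _ _ (by simpa using Nat.ne_of_lt hjl),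
              List.take_append_of_le_length (le_of_lt hjl),
              ihb j hjl (by rwa [List.getD_append _ _ _ j hjl] at hgj)]
          · subst hje
            rw [PySem.Dict.getD_insert_self, List.take_left, iha]
        · simp
        · intro j hj
          rw [PySem.Dict.getD_insert_self, PySem.Dict.contains_insert]
          have : j ≠ cs'.length := by simp at hj; omega
          rw [ixd j (by simp at hj; omega)]
          simpa using this
      · rw [PySem.Dict.getD_insert_of_ne _ _ _ hcx]
        refine ⟨?_, ?_, ?_, ?_⟩
        · rw [iha, List.count_append]
          have : List.count c [x] = 0 := by
            simp [List.count_singleton]; exact fun h => hcx h.symm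
          omega
        · intro j hj hgj
          rcases Nat.lt_succ_iff_lt_or_eq.1 (by simpa using hj) with hjl | hje
          · rw [List.take_append_of_le_length (le_of_lt hjl),
              ihb j hjl (by rwa [List.getD_append _ _ _ j hjl] at hgj)]
          · exfalso; subst hje
            rw [List.getD_append_right _ _ _ _ le_rfl] at hgj
            simp at hgj; exact hcx hgj.symm
        · rw [PySem.Dict.contains_insert, ihc]
          simp [hcx]
        · intro j hj
          exact ihd j (by simp at hj; omega)
    · -- first occurrence of the letter: a fresh singleton inner dict
      rw [hunf, if_neg (by rw [ixc]; simpa using hx)]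
      by_cases hcx : c = x
      · subst hcx
        refine ⟨?_, ?_, ?_, ?_⟩
        · rw [PySem.Dict.getD_insert_self, PySem.Dict.size_insert,
            if_neg (by simp [PySem.Dict.contains_empty]), PySem.Dict.size_empty,
            List.count_append, List.count_eq_zero_of_not_mem hx]
          simp
        · intro j hj hgj
          rw [PySem.Dict.getD_insert_self]
          rcases Nat.lt_succ_iff_lt_or_eq.1 (by simpa using hj) with hjl | hje
          · exfalso
            rw [List.getD_append _ _ _ j hjl, List.getD_eq_getElem _ _ hjl] at hgj
            exact hx (hgj ▸ List.getElem_mem hjl)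
          · subst hje
            rw [PySem.Dict.getD_insert_self, List.take_left,
              List.count_eq_zero_of_not_mem hx]
            simp
        · simp
        · intro j hj
          rw [PySem.Dict.getD_insert_self, PySem.Dict.contains_insert]
          have : j ≠ cs'.length := by simp at hj; omega
          simpa [PySem.Dict.contains_empty] using this
      · rw [PySem.Dict.getD_insert_of_ne _ _ _ hcx]
        refine ⟨?_, ?_, ?_, ?_⟩
        · rw [iha, List.count_append]
          have : List.count c [x] = 0 := by
            simp [List.count_singleton]; exact fun h => hcx h.symm
          omega
        · intro j hj hgj
          rcases Nat.lt_succ_iff_lt_or_eq.1 (by simpa using hj) with hjl | hje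
          · rw [List.take_append_of_le_length (le_of_lt hjl),
              ihb j hjl (by rwa [List.getD_append _ _ _ j hjl] at hgj)]
          · exfalso; subst hje
            rw [List.getD_append_right _ _ _ _ le_rfl] at hgj
            simp at hgj; exact hcx hgj.symm
        · rw [PySem.Dict.contains_insert, ihc]
          simp [hcx]
        · intro j hj
          exact ihd j (by simp at hj; omega)

theorem map_getD_range (l : List Char) (d : Char) :
    (List.range l.length).map (fun j => l.getD j d) = l := by
  apply List.ext_getElem (by simp)
  intro i h1 h2
  simp only [List.getElem_map, List.getElem_range]
  exact List.getD_eq_getElem l d h2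

theorem countP_disjoint_split {α : Type} (l : List α) (p q : α → Prop) [DecidablePred p]
    [DecidablePred q] (h : ∀ x, ¬ (p x ∧ q x)) :
    l.countP (fun x => decide (p x ∨ q x))
      = l.countP (fun x => decide (p x)) + l.countP (fun x => decide (q x)) := by
  induction l with
  | nil => rfl
  | cons a l ih =>
    simp only [List.countP_cons, ih]
    by_cases hp : p a <;> by_cases hq : q a
    · exact absurd ⟨hp, hq⟩ (h a)
    · simp [hp, hq]; omega
    · simp [hp, hq]; omega
    · simp [hp, hq]

theorem countP_partA (cs : List Char) (c : Char) :
    (List.range cs.length).countP (fun j => decide (cs.getD j ' ' < c))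
      = cs.countP (fun d => decide (d < c)) := by
  conv_rhs => rw [← map_getD_range cs ' ']
  rw [List.countP_map]
  rfl

theorem countP_partB (cs : List Char) (c : Char) (i : Nat) (hi : i ≤ cs.length) :
    (List.range cs.length).countP (fun j => decide (cs.getD j ' ' = c ∧ j < i))
      = (cs.take i).count c := by
  have hsplit : cs.length = i + (cs.length - i) := by omega
  rw [hsplit, List.range_add, List.countP_append]
  have h2 : (List.countP (fun j => decide (cs.getD j ' ' = c ∧ j < i))
      ((List.range (cs.length - i)).map (fun x => i + x))) = 0 := by
    rw [List.countP_eq_zero]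
    intro a ha
    obtain ⟨x, _, rfl⟩ := List.mem_map.1 ha
    simp
  rw [h2, Nat.add_zero]
  have h3 : (List.range i).countP (fun j => decide (cs.getD j ' ' = c ∧ j < i))
      = (List.range i).countP (fun j => (cs.take i).getD j ' ' == c) := by
    apply List.countP_congr
    intro j hj
    have hji : j < i := List.mem_range.1 hj
    simp [hji]
  rw [h3, List.count_eq_countP]
  conv_rhs => rw [← map_getD_range (cs.take i) ' ']
  rw [List.countP_map]
  have hlen : (cs.take i).length = i := by simp; omega
  rw [hlen]
  rfl

theorem lfval_eq (cs : List Char) (i : Nat) (hi : i < cs.length) :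
    (List.range cs.length).foldl
      (fun acc j =>
        if cs.getD j ' ' < cs.getD i ' ' ∨ (cs.getD j ' ' = cs.getD i ' ' ∧ j < i)
        then acc + 1 else acc) (0 : Int)
    = ((cs.countP (fun d => decide (d < cs.getD i ' ')) : Nat) : Int)
      + (((cs.take i).count (cs.getD i ' ') : Nat) : Int) := by
  have h := PySem.List.foldl_count_if
    (fun j => decide (cs.getD j ' ' < cs.getD i ' ' ∨ (cs.getD j ' ' = cs.getD i ' ' ∧ j < i)))
    (List.range cs.length) 0
  simp only [decide_eq_true_eq] at h
  rw [h, zero_add, countP_disjoint_split _ _ _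
    (fun x ⟨h1, h2⟩ => absurd h2.1 (ne_of_lt h1)),
    countP_partA, countP_partB cs _ i (le_of_lt hi)]
  push_cast
  ring

theorem lf_bound (cs : List Char) (i : Nat) (hi : i < cs.length) :
    cs.countP (fun d => decide (d < cs.getD i ' ')) + (cs.take i).count (cs.getD i ' ')
      < cs.length := by
  set c := cs.getD i ' ' with hc
  have hd : cs.countP (fun d => decide (d < c ∨ d = c))
      = cs.countP (fun d => decide (d < c)) + cs.countP (fun d => decide (d = c)) :=
    countP_disjoint_split cs _ _ (fun x ⟨h1, h2⟩ => absurd h2 (ne_of_lt h1))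
  have hle : cs.countP (fun d => decide (d < c ∨ d = c)) ≤ cs.length :=
    List.countP_le_length
  have hcnt : cs.count c = cs.countP (fun d => decide (d = c)) := by
    rw [List.count_eq_countP]
    exact List.countP_congr (fun x _ => by simp)
  have hcs : cs = cs.take i ++ cs.drop i := (List.take_append_drop i cs).symm
  have hdrop : cs.drop i = cs[i] :: cs.drop (i + 1) := List.drop_eq_getElem_cons hi
  have hci : cs[i] = c := by rw [hc, List.getD_eq_getElem _ _ hi]
  have hsum : cs.count c = (cs.take i).count c + (cs.drop i).count c := by
    conv_lhs => rw [hcs]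
    rw [List.count_append]
  have h1 : 1 ≤ (cs.drop i).count c := by
    rw [hdrop, hci, List.count_cons]
    simp
  omega

theorem step_eq (cs : List Char) (m : Nat) (hm : m < cs.length) :
    (GetRanksA cs).getD (cs.getD m ' ') 0 +
      ((GetCharPositionsA cs).getD (cs.getD m ' ') PySem.Dict.empty).getD (m : Int) 0
    = ((cs.countP (fun d => decide (d < cs.getD m ' ')) : Nat) : Int)
      + (((cs.take m).count (cs.getD m ' ') : Nat) : Int) := by
  have hmem : cs.getD m ' ' ∈ cs := by
    rw [List.getD_eq_getElem _ _ hm]; exact List.getElem_mem hm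
  rw [getD_GetRanksA cs _ hmem, (posA_inv cs (cs.getD m ' ')).2.1 m hm rfl]

theorem walk (cs : List Char) (hn : 0 < cs.length) (k : Nat) :
    ∃ m : Nat,
      (((List.range k).foldl
          (fun (st : List Char × Int) _ =>
            ((PySem.List.pyGetD cs st.2 ' ') :: st.1,
              (GetRanksA cs).getD (PySem.List.pyGetD cs st.2 ' ') 0 +
                ((GetCharPositionsA cs).getD (PySem.List.pyGetD cs st.2 ' ')
                  PySem.Dict.empty).getD st.2 0))
          (['$'], 0)).2 = (m : Int))
      ∧ (((List.range k).foldl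
          (fun (st : List Char × Int) _ =>
            (st.1 ++ [PySem.List.pyGetD cs st.2 ' '],
              PySem.List.pyGetD ((List.range cs.length).map (fun i =>
                (List.range cs.length).foldl
                  (fun acc j =>
                    if cs.getD j ' ' < cs.getD i ' ' ∨ (cs.getD j ' ' = cs.getD i ' ' ∧ j < i)
                    then acc + 1 else acc) 0)) st.2 0))
          (([] : List Char), 0)).2 = (m : Int))
      ∧ m < cs.length
      ∧ (((List.range k).foldl
          (fun (st : List Char × Int) _ =>
            ((PySem.List.pyGetD cs st.2 ' ') :: st.1,
              (GetRanksA cs).getD (PySem.List.pyGetD cs st.2 ' ') 0 +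
                ((GetCharPositionsA cs).getD (PySem.List.pyGetD cs st.2 ' ')
                  PySem.Dict.empty).getD st.2 0))
          (['$'], 0)).1
        = (((List.range k).foldl
          (fun (st : List Char × Int) _ =>
            (st.1 ++ [PySem.List.pyGetD cs st.2 ' '],
              PySem.List.pyGetD ((List.range cs.length).map (fun i =>
                (List.range cs.length).foldl
                  (fun acc j =>
                    if cs.getD j ' ' < cs.getD i ' ' ∨ (cs.getD j ' ' = cs.getD i ' ' ∧ j < i)
                    then acc + 1 else acc) 0)) st.2 0))
          (([] : List Char), 0)).1).reverse ++ ['$']) := by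
  induction k with
  | zero => exact ⟨0, rfl, rfl, hn, rfl⟩
  | succ k ih =>
    obtain ⟨m, hA2, hB2, hmlt, h1⟩ := ih
    simp only [List.range_succ, List.foldl_append, List.foldl_cons, List.foldl_nil]
    refine ⟨cs.countP (fun d => decide (d < cs.getD m ' '))
      + (cs.take m).count (cs.getD m ' '), ?_, ?_, lf_bound cs m hmlt, ?_⟩
    · rw [hA2, PySem.List.pyGetD_natCast, step_eq cs m hmlt]
      push_cast; ring
    · rw [hB2, PySem.List.pyGetD_natCast,
        PySem.List.getD_map_range _ _ _ _ hmlt, lfval_eq cs m hmlt]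
      push_cast; ring
    · rw [hA2, hB2, PySem.List.pyGetD_natCast, h1]
      simp

-- ===== VERDICT (by name: the statement is the Claim_ definition above) =====
theorem BWTDecode_spec : Claim_equal_BWTDecode := by
  intro word _
  show BWTDecode word = BWTDecode_alt word
  rcases Nat.eq_zero_or_pos word.toList.length with h0 | hpos
  · rw [List.length_eq_zero_iff] at h0
    show String.ofList _ = String.ofList _
    rw [h0]
    rfl
  · have hw := walk word.toList hpos (word.toList.length - 1)
    obtain ⟨m, _, _, _, h1⟩ := hw
    show String.ofList _ = String.ofList _
    rw [h1]
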